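-- pv_equiv track=rewrite | github.com/YehudaShani/Authentication-Simulations | helpers/wallet_enumerations.py | deduplicateWalletsByArchitecture
-- ===== SOURCE A (Python) =====
-- import itertools
--
-- def permuteBits(number, permutation):
--     """Apply a permutation of bit positions to an integer bitmask.
--
--     permutation is a tuple/list where index i maps bit (i) to bit (permutation[i]).
--     Bit positions are 1-based in our logic (LSB is position 1).
--     """
--     result = 0
--     for i, target_pos in enumerate(permutation, start=1):
--         if number & (1 << (i - 1)):
--             result |= (1 << (target_pos - 1))
--     return result
--
-- def canonicalizeWallet(wallet, keyCount):
--     """Return a canonical representation of a wallet up to key index renaming.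
--
--     We test all permutations of key indices (1..keyCount) and choose the
--     lexicographically smallest sorted tuple of permuted combinations.
--     """
--     indices = tuple(range(1, keyCount + 1))
--     best = None
--     for perm in itertools.permutations(indices):
--         transformed = tuple(sorted(permuteBits(c, perm) for c in wallet))
--         if best is None or transformed < best:
--             best = transformed
--     return best
--
-- def deduplicateWalletsByArchitecture(wallets, keyCount):
--     """Deduplicate wallets that are identical up to key renaming.
--
--     Useful when all keys are homogeneous and success probability depends only
--     on structure, not on which specific keys are used.
--     """
--     seen = set()
--     unique = []
--     for wallet in wallets:
--         canon = canonicalizeWallet(wallet, keyCount)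
--         if canon not in seen:
--             seen.add(canon)
--             unique.append(wallet)
--     return unique
-- ===== SOURCE B (Python) =====
-- import itertools
--
-- def permuteBits(number, permutation):
--     result = 0
--     for i, target_pos in enumerate(permutation, start=1):
--         if number & (1 << (i - 1)):
--             result |= (1 << (target_pos - 1))
--     return result
--
-- def deduplicateWalletsByArchitecture(wallets, keyCount):
--     """Deduplicate wallets identical up to key renaming, without ever computing
--     a lexicographically-minimal canonical form: keep one representative per
--     class, and remember EVERY permuted form of each accepted representative;
--     an incoming wallet is tested by membership of its identity-permuted
--     sorted form in that one set."""
--     identity = tuple(range(1, keyCount + 1))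
--     seen_forms = set()
--     unique = []
--     for wallet in wallets:
--         key = tuple(sorted(permuteBits(c, identity) for c in wallet))
--         if key not in seen_forms:
--             unique.append(wallet)
--             for perm in itertools.permutations(identity):
--                 seen_forms.add(tuple(sorted(permuteBits(c, perm) for c in wallet)))
--     return unique
-- ===== Notes on version B (the rewrite author's own statement) =====
-- stated objective: alternative
-- what changed: Instead of computing the lexicographically-minimal canonical form of every wallet (a min over all k! permutations) and storing those canons, B stores every permuted sorted form of each accepted representative in one set, so each wallet is tested by its identity-permuted sorted form with a single set lookup, and the k! enumeration runs only once per distinct architecture (same cost on inputs whose wallets are mostly inequivalent).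
import Mathlib
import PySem

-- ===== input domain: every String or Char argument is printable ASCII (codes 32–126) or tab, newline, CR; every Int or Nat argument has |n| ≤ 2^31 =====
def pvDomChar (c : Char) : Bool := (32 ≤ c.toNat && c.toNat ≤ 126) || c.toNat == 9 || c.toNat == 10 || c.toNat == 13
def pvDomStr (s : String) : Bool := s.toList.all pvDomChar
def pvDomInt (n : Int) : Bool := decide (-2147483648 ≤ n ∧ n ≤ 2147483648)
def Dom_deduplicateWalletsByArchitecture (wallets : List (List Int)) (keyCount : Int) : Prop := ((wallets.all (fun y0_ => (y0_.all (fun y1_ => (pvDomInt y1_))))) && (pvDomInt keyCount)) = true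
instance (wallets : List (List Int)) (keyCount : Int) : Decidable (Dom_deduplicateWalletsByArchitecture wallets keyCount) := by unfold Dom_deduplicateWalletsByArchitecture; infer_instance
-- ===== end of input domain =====

-- B replaces A's per-wallet canonical-minimum scan over all k! permutations by a set of ALL
-- permuted forms of each accepted representative, tested via one lookup of the wallet's
-- identity-permuted sorted form (objective: alternative algorithm; proved equal on every input).

-- ===== PORT A =====
-- `number & (1 << (i-1))` truth test (Python-exact incl. negative numbers via PySem.Int.band;
-- 1 << (i-1) = 2^(i-1), exact since the 0-based position i-1 is a Nat here).
def pvBitTest (n : Int) (pos : Nat) : Bool := PySem.Int.band n ((2:Int) ^ pos) != 0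

-- the loop of permuteBits: `result |= 1 << (target_pos - 1)`; the accumulator is a Nat,
-- exact because result starts at 0 and only ORs in nonnegative powers 2^(target_pos-1);
-- (t-1).toNat is exact for target_pos ≥ 1, which holds on every call (entries of a
-- permutation of 1..keyCount).
def permuteBitsAux (n : Int) : List Int → Nat → Nat → Nat
  | [], _, acc => acc
  | t :: rest, i, acc =>
      permuteBitsAux n rest (i + 1) (if pvBitTest n i then acc ||| 2 ^ (t - 1).toNat else acc)

def permuteBits (n : Int) (perm : List Int) : Int := Int.ofNat (permuteBitsAux n perm 0 0)

-- Python tuple `<` on int tuples (lexicographic, shorter prefix is smaller)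
def tupLt : List Int → List Int → Bool
  | _, [] => false
  | [], _ :: _ => true
  | a :: as, b :: bs => a < b || (a == b && tupLt as bs)

-- plain `sorted(...)` on an int iterable
def srt (l : List Int) : List Int := PySem.List.sorted l (fun x => x) false

def canonicalizeWallet (wallet : List Int) (keyCount : Int) : Option (List Int) :=
  let indices := PySem.List.pyRange 1 (keyCount + 1) 1
  (PySem.List.permutations indices indices.length).foldl
    (fun best perm =>
      let transformed := srt (wallet.map (fun c => permuteBits c perm))
      match best with
      | none => some transformed
      | some b => if tupLt transformed b then some transformed else some b)
    none

def deduplicateWalletsByArchitecture (wallets : List (List Int)) (keyCount : Int) : List (List Int) :=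
  (wallets.foldl
    (fun (st : PySem.Set (Option (List Int)) × List (List Int)) wallet =>
      let canon := canonicalizeWallet wallet keyCount
      if PySem.Set.contains st.1 canon then st
      else (PySem.Set.add st.1 canon, st.2 ++ [wallet]))
    (PySem.Set.empty, [])).2

-- ===== PORT B =====
def deduplicateWalletsByArchitecture_alt (wallets : List (List Int)) (keyCount : Int) : List (List Int) :=
  let identity := PySem.List.pyRange 1 (keyCount + 1) 1
  (wallets.foldl
    (fun (st : PySem.Set (List Int) × List (List Int)) wallet =>
      let key := srt (wallet.map (fun c => permuteBits c identity))
      if PySem.Set.contains st.1 key then st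
      else ((PySem.List.permutations identity identity.length).foldl
              (fun s perm => PySem.Set.add s (srt (wallet.map (fun c => permuteBits c perm)))) st.1,
            st.2 ++ [wallet]))
    (PySem.Set.empty, [])).2

-- ===== PRECONDITION & SPEC =====
def Spec_deduplicateWalletsByArchitecture (wallets : List (List Int)) (keyCount : Int) (out : List (List Int)) : Prop := out = deduplicateWalletsByArchitecture_alt wallets keyCount
instance (wallets : List (List Int)) (keyCount : Int) (out : List (List Int)) : Decidable (Spec_deduplicateWalletsByArchitecture wallets keyCount out) := by unfold Spec_deduplicateWalletsByArchitecture; infer_instance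

-- ===== CLAIM (what is proved, stated in full; the proofs are below) =====
def Claim_equal_deduplicateWalletsByArchitecture : Prop := ∀ (wallets : List (List Int)) (keyCount : Int), Dom_deduplicateWalletsByArchitecture wallets keyCount → Spec_deduplicateWalletsByArchitecture wallets keyCount (deduplicateWalletsByArchitecture wallets keyCount)

-- ===== LEMMAS AND PROOFS =====

-- Proof-side abbreviations: the 1..keyCount index list, its permutation list, one
-- permuted-and-sorted form, the orbit of a wallet, the identity form, composition of
-- permutations-as-position-lists ((comp p q)[i] = q[p[i]-1]), and A's minimum fold.
def rng (k : Int) : List Int := PySem.List.pyRange 1 (k + 1) 1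
def P (k : Int) : List (List Int) := PySem.List.permutations (rng k) (rng k).length
def tf (w : List Int) (p : List Int) : List Int := srt (w.map (fun c => permuteBits c p))
def orb (w : List Int) (k : Int) : List (List Int) := (P k).map (tf w)
def keyOf (w : List Int) (k : Int) : List Int := tf w (rng k)
def comp (p q : List Int) : List Int := p.map (fun t => q.getD (t - 1).toNat 0)
def minFold (L : List (List Int)) : Option (List Int) :=
  L.foldl (fun best t => match best with
    | none => some t
    | some b => if tupLt t b then some t else some b) none

theorem testBit_permuteBitsAux (n : Int) (p : List Int) (i acc : Nat) (j : Nat) :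
    (permuteBitsAux n p i acc).testBit j = true ↔
      acc.testBit j = true ∨ ∃ d, ∃ h : d < p.length, pvBitTest n (i + d) = true ∧ (p[d] - 1).toNat = j := by
  induction p generalizing i acc with
  | nil => simp [permuteBitsAux]
  | cons t rest ih =>
    simp only [permuteBitsAux]
    rw [ih]
    by_cases hbt : pvBitTest n i = true
    · simp only [hbt, if_true, Nat.testBit_or, Nat.testBit_two_pow, Bool.or_eq_true, decide_eq_true_eq]
      constructor
      · rintro ((h | h) | ⟨d, hd, hb, hj⟩)
        · exact Or.inl h
        · exact Or.inr ⟨0, by simp, by simpa using hbt, by simpa using h⟩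
        · exact Or.inr ⟨d + 1, by simpa using hd, by rw [show i + (d+1) = i + 1 + d by omega]; exact hb, by simpa using hj⟩
      · rintro (h | ⟨d, hd, hb, hj⟩)
        · exact Or.inl (Or.inl h)
        · match d, hd with
          | 0, _ => exact Or.inl (Or.inr (by simpa using hj))
          | (d+1), hd =>
            exact Or.inr ⟨d, by simpa using hd, by rw [show i + 1 + d = i + (d+1) by omega]; exact hb, by simpa using hj⟩
    · rw [Bool.not_eq_true] at hbt
      simp only [hbt]
      constructor
      · rintro (h | ⟨d, hd, hb, hj⟩)
        · exact Or.inl h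
        · exact Or.inr ⟨d + 1, by simpa using hd, by rw [show i + (d+1) = i + 1 + d by omega]; exact hb, by simpa using hj⟩
      · rintro (h | ⟨d, hd, hb, hj⟩)
        · exact Or.inl h
        · match d, hd with
          | 0, _ => simp only [Nat.add_zero] at hb; rw [hbt] at hb; cases hb
          | (d+1), hd =>
            exact Or.inr ⟨d, by simpa using hd, by rw [show i + 1 + d = i + (d+1) by omega]; exact hb, by simpa using hj⟩

theorem pvBitTest_ofNat (m : Nat) (i : Nat) : pvBitTest (Int.ofNat m) i = m.testBit i := by
  have h2 : ((2:Int) ^ i) = ((2 ^ i : Nat) : Int) := by push_cast; ring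
  simp only [pvBitTest, h2, Int.ofNat_eq_natCast, PySem.Int.band_natCast, Nat.and_two_pow]
  cases h : m.testBit i <;> simp

theorem testBit_permuteBits (n : Int) (p : List Int) (j : Nat) :
    (permuteBitsAux n p 0 0).testBit j = true ↔
      ∃ d, ∃ h : d < p.length, pvBitTest n d = true ∧ (p[d] - 1).toNat = j := by
  rw [testBit_permuteBitsAux]
  simp

theorem permuteBits_comp (n : Int) (p q : List Int)
    (hp : ∀ t ∈ p, 1 ≤ t ∧ t ≤ (q.length : Int)) :
    permuteBits (permuteBits n p) q = permuteBits n (comp p q) := by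
  unfold permuteBits
  congr 1
  apply Nat.eq_of_testBit_eq
  intro j
  rw [Bool.eq_iff_iff, testBit_permuteBits, testBit_permuteBits]
  constructor
  · rintro ⟨d2, hd2, hb2, hj2⟩
    rw [pvBitTest_ofNat, testBit_permuteBits] at hb2
    obtain ⟨d, hd, hb, hdd⟩ := hb2
    refine ⟨d, by simpa [comp] using hd, hb, ?_⟩
    have : (comp p q)[d]'(by simpa [comp] using hd) = q.getD (p[d] - 1).toNat 0 := by
      simp [comp]
    rw [this, hdd, List.getD_eq_getElem q 0 hd2, hj2]
  · rintro ⟨d, hd, hb, hj⟩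
    have hd' : d < p.length := by simpa [comp] using hd
    have hpd := hp (p[d]'hd') (List.getElem_mem hd')
    have hcomp : (comp p q)[d] = q.getD (p[d] - 1).toNat 0 := by simp [comp]
    have hd2 : (p[d]'hd' - 1).toNat < q.length := by omega
    refine ⟨(p[d]'hd' - 1).toNat, hd2, ?_, ?_⟩
    · rw [pvBitTest_ofNat, testBit_permuteBits]
      exact ⟨d, hd', hb, rfl⟩
    · rw [← List.getD_eq_getElem q 0 hd2, ← hcomp, hj]

theorem perm_mem_permutations {α : Type} [DecidableEq α] (xs l : List α) (h : l.Perm xs) :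
    l ∈ PySem.List.permutations xs xs.length := by
  induction l generalizing xs with
  | nil =>
    have : xs = [] := (List.Perm.nil_eq h).symm
    subst this
    simp [PySem.List.permutations_zero]
  | cons a l ih =>
    have ha : a ∈ xs := h.mem_iff.mp (List.mem_cons_self)
    obtain ⟨i, hi, hget⟩ : ∃ i, ∃ _ : i < xs.length, xs[i] = a := by
      obtain ⟨i, hi, hx⟩ := List.getElem_of_mem ha
      exact ⟨i, hi, hx⟩
    have hsome : xs[i]? = some a := by rw [List.getElem?_eq_getElem hi, hget]
    have hperm : (a :: xs.eraseIdx i).Perm xs := PySem.List.perm_cons_eraseIdx xs hsome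
    have hl : l.Perm (xs.eraseIdx i) := (h.trans hperm.symm).cons_inv
    have hlen : xs.length = (xs.eraseIdx i).length + 1 := by
      rw [List.length_eraseIdx_of_lt hi]; omega
    rw [hlen, PySem.List.permutations_succ]
    apply List.mem_flatMap.mpr
    refine ⟨i, by simp [List.mem_range, hi], ?_⟩
    simp only [hsome]
    exact List.mem_map.mpr ⟨l, ih _ hl, rfl⟩

theorem mem_P_iff (k : Int) (p : List Int) : p ∈ P k ↔ p.Perm (rng k) := by
  constructor
  · exact PySem.List.perm_of_mem_permutations
  · exact perm_mem_permutations _ _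

theorem map_rng_getD (k : Int) (q : List Int) (hq : q.length = (rng k).length) :
    (rng k).map (fun t => q.getD (t - 1).toNat 0) = q := by
  have hlen : (rng k).length = (k + 1 - 1).toNat := by
    simp [rng, PySem.List.pyRange_one]
  rw [rng, PySem.List.pyRange_one]
  apply List.ext_getElem
  · simpa [hlen, rng, PySem.List.pyRange_one] using hq.symm
  · intro i h1 h2
    simp only [List.getElem_map, List.getElem_range]
    have : ((1 : Int) + (i : Int) - 1).toNat = i := by omega
    rw [this, List.getD_eq_getElem q 0 h2]

theorem comp_perm (k : Int) (p q : List Int) (hp : p.Perm (rng k)) (hq : q.Perm (rng k)) :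
    (comp p q).Perm (rng k) := by
  have h1 : (comp p q).Perm ((rng k).map (fun t => q.getD (t - 1).toNat 0)) :=
    List.Perm.map _ hp
  rw [map_rng_getD k q (hq.length_eq)] at h1
  exact h1.trans hq

theorem comp_surj (k : Int) (p r : List Int) (hp : p.Perm (rng k)) (hr : r.Perm (rng k)) :
    ∃ q, q.Perm (rng k) ∧ comp p q = r := by
  let S : Finset (List Int) := (P k).toFinset
  have hmemS : ∀ q, q ∈ S ↔ q.Perm (rng k) := by
    intro q; simp [S, List.mem_toFinset, mem_P_iff]
  have hsub : S.image (fun q => comp p q) ⊆ S := by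
    intro x hx
    obtain ⟨q, hq, hxeq⟩ := Finset.mem_image.mp hx
    rw [hmemS]
    exact hxeq ▸ comp_perm k p q hp ((hmemS q).mp hq)
  have hinj : Set.InjOn (fun q => comp p q) S := by
    intro q1 hq1 q2 hq2 heq
    have hq1' := (hmemS q1).mp (by simpa using hq1)
    have hq2' := (hmemS q2).mp (by simpa using hq2)
    have hptwise : ∀ t ∈ p, q1.getD (t - 1).toNat 0 = q2.getD (t - 1).toNat 0 :=
      List.map_inj_left.mp heq
    apply List.ext_getElem (by rw [hq1'.length_eq, hq2'.length_eq])
    intro i h1 h2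
    have ht : ((i : Int) + 1) ∈ p := by
      rw [hp.mem_iff, rng, PySem.List.mem_pyRange_one]
      have : i < (rng k).length := by rw [← hq1'.length_eq]; exact h1
      have hlen : (rng k).length = (k + 1 - 1).toNat := by simp [rng, PySem.List.pyRange_one]
      omega
    have := hptwise _ ht
    have htn : (((i : Int) + 1) - 1).toNat = i := by omega
    rw [htn, List.getD_eq_getElem q1 0 h1, List.getD_eq_getElem q2 0 h2] at this
    exact this
  have hcard : (S.image (fun q => comp p q)).card = S.card := Finset.card_image_of_injOn hinj
  have heqS : S.image (fun q => comp p q) = S :=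
    Finset.eq_of_subset_of_card_le hsub (by omega)
  have hr' : r ∈ S.image (fun q => comp p q) := by rw [heqS]; exact (hmemS r).mpr hr
  obtain ⟨q, hq, hqe⟩ := Finset.mem_image.mp hr'
  exact ⟨q, (hmemS q).mp hq, hqe⟩

theorem srt_eq_of_perm (l1 l2 : List Int) (h : l1.Perm l2) : srt l1 = srt l2 :=
  PySem.List.sorted_eq_sorted_of_perm l1 l2 (fun x => x) (fun _ _ h => h) h

theorem tf_tf (k : Int) (w p q : List Int) (hp : p.Perm (rng k)) (hq : q.Perm (rng k)) :
    tf (tf w p) q = tf w (comp p q) := by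
  have hlen : (rng k).length = (k + 1 - 1).toNat := by simp [rng, PySem.List.pyRange_one]
  have h1 : (tf w p).Perm (w.map (fun c => permuteBits c p)) :=
    PySem.List.sorted_perm _ _ _
  have h2 : ((tf w p).map (fun c => permuteBits c q)).Perm
      ((w.map (fun c => permuteBits c p)).map (fun c => permuteBits c q)) := h1.map _
  rw [show tf (tf w p) q = srt ((tf w p).map (fun c => permuteBits c q)) from rfl,
      srt_eq_of_perm _ _ h2, List.map_map]
  unfold tf
  congr 1
  apply List.map_congr_left
  intro c _
  simp only [Function.comp]
  apply permuteBits_comp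
  intro t htp
  rw [hp.mem_iff, rng, PySem.List.mem_pyRange_one] at htp
  rw [hq.length_eq, hlen]
  omega

theorem mem_orb_trans (k : Int) (w s : List Int) (hs : s ∈ orb w k) :
    ∀ x, x ∈ orb s k ↔ x ∈ orb w k := by
  obtain ⟨p, hpP, rfl⟩ := List.mem_map.mp hs
  have hp : p.Perm (rng k) := (mem_P_iff k p).mp hpP
  intro x
  constructor
  · intro hx
    obtain ⟨q, hqP, rfl⟩ := List.mem_map.mp hx
    have hq : q.Perm (rng k) := (mem_P_iff k q).mp hqP
    rw [tf_tf k w p q hp hq]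
    exact List.mem_map.mpr ⟨comp p q, (mem_P_iff k _).mpr (comp_perm k p q hp hq), rfl⟩
  · intro hx
    obtain ⟨r, hrP, rfl⟩ := List.mem_map.mp hx
    have hr : r.Perm (rng k) := (mem_P_iff k r).mp hrP
    obtain ⟨q, hq, rfl⟩ := comp_surj k p r hp hr
    rw [← tf_tf k w p q hp hq]
    exact List.mem_map.mpr ⟨q, (mem_P_iff k q).mpr hq, rfl⟩

theorem tupLt_irrefl (a : List Int) : tupLt a a = false := by
  induction a with
  | nil => rfl
  | cons x as ih => simp [tupLt, ih]

theorem tupLt_trans (a b c : List Int) : tupLt a b = true → tupLt b c = true → tupLt a c = true := by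
  induction a generalizing b c with
  | nil =>
    intro h1 h2
    cases b with
    | nil => simp [tupLt] at h1
    | cons y bs =>
      cases c with
      | nil => simp [tupLt] at h2
      | cons z cs => simp [tupLt]
  | cons x as ih =>
    intro h1 h2
    cases b with
    | nil => simp [tupLt] at h1
    | cons y bs =>
      cases c with
      | nil => simp [tupLt] at h2
      | cons z cs =>
        simp only [tupLt, Bool.or_eq_true, Bool.and_eq_true, decide_eq_true_eq, beq_iff_eq] at *
        rcases h1 with h1 | ⟨he1, ht1⟩ <;> rcases h2 with h2 | ⟨he2, ht2⟩
        · exact Or.inl (by omega)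
        · exact Or.inl (by omega)
        · exact Or.inl (by omega)
        · exact Or.inr ⟨by omega, ih bs cs ht1 ht2⟩

theorem tupLt_connex (a b : List Int) : tupLt a b = false → tupLt b a = false → a = b := by
  induction a generalizing b with
  | nil =>
    intro h1 _
    cases b with
    | nil => rfl
    | cons y bs => simp [tupLt] at h1
  | cons x as ih =>
    intro h1 h2
    cases b with
    | nil => simp [tupLt] at h2
    | cons y bs =>
      simp only [tupLt, Bool.or_eq_false_iff, Bool.and_eq_false_iff, decide_eq_false_iff_not,
        beq_eq_false_iff_ne, ne_eq, not_lt] at h1 h2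
      have hxy : x = y := by
        rcases h1.2 with h | h <;> rcases h2.2 with h' | h' <;> omega
      subst hxy
      have has : as = bs := by
        apply ih
        · rcases h1.2 with h | h
          · omega
          · exact h
        · rcases h2.2 with h | h
          · omega
          · exact h
      rw [has]

theorem minFoldAux_spec (L : List (List Int)) (b : List Int) :
    ∃ m, L.foldl (fun best t => match best with
      | none => some t
      | some b => if tupLt t b then some t else some b) (some b) = some m ∧
      m ∈ b :: L ∧ ∀ x ∈ b :: L, tupLt x m = false := by
  induction L generalizing b with
  | nil =>
    refine ⟨b, rfl, List.mem_cons_self, ?_⟩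
    intro x hx
    rw [List.mem_singleton] at hx
    subst hx
    exact tupLt_irrefl x
  | cons t L ih =>
    simp only [List.foldl_cons]
    by_cases hc : tupLt t b = true
    · rw [if_pos hc]
      obtain ⟨m, hm, hmem, hmin⟩ := ih t
      refine ⟨m, hm, ?_, ?_⟩
      · rcases List.mem_cons.mp hmem with rfl | h
        · exact List.mem_cons_of_mem _ List.mem_cons_self
        · exact List.mem_cons_of_mem _ (List.mem_cons_of_mem _ h)
      · intro x hx
        rcases List.mem_cons.mp hx with rfl | hx'
        · -- x = b ; know ¬ t < m and t < b, so if b < m then t < m, contradiction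
          cases hbm : tupLt x m
          · rfl
          · have := tupLt_trans t x m hc hbm
            rw [hmin t List.mem_cons_self] at this
            cases this
        · exact hmin x hx'
    · rw [if_neg hc]
      obtain ⟨m, hm, hmem, hmin⟩ := ih b
      refine ⟨m, hm, ?_, ?_⟩
      · rcases List.mem_cons.mp hmem with rfl | h
        · exact List.mem_cons_self
        · exact List.mem_cons_of_mem _ (List.mem_cons_of_mem _ h)
      · intro x hx
        rcases List.mem_cons.mp hx with rfl | hx'
        · exact hmin x List.mem_cons_self
        · rcases List.mem_cons.mp hx' with rfl | hx''
          · -- x = t ; ¬(t < b); if t < m then since ¬ b < m and ¬ m < b? need: t < m → contra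
            cases htm : tupLt x m
            · rfl
            · -- t < m, m ≤ b (¬ b < m), so t < b unless m = b
              have hbm := hmin b List.mem_cons_self
              have hmb_or : tupLt m b = true ∨ m = b := by
                rcases hmemb : tupLt m b
                · right; exact tupLt_connex m b hmemb hbm
                · left; rfl
              rcases hmb_or with hmb | rfl
              · have := tupLt_trans x m b htm hmb
                exact absurd this hc
              · exact absurd htm hc
          · exact hmin x (List.mem_cons_of_mem _ hx'')

theorem minFold_spec (L : List (List Int)) (hL : L ≠ []) :
    ∃ m, minFold L = some m ∧ m ∈ L ∧ ∀ x ∈ L, tupLt x m = false := by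
  cases L with
  | nil => exact absurd rfl hL
  | cons t L =>
    obtain ⟨m, hm, hmem, hmin⟩ := minFoldAux_spec L t
    exact ⟨m, hm, hmem, hmin⟩

theorem canonicalizeWallet_eq_minFold (w : List Int) (k : Int) :
    canonicalizeWallet w k = minFold (orb w k) := by
  unfold canonicalizeWallet minFold orb tf P rng
  rw [List.foldl_map]

theorem rng_mem_P (k : Int) : rng k ∈ P k := (mem_P_iff k _).mpr (List.Perm.refl _)

theorem orb_ne_nil (w : List Int) (k : Int) : orb w k ≠ [] := by
  intro h
  have : tf w (rng k) ∈ orb w k := List.mem_map.mpr ⟨rng k, rng_mem_P k, rfl⟩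
  rw [h] at this
  cases this

theorem canon_eq_of_orb_iff (v w : List Int) (k : Int)
    (h : ∀ x, x ∈ orb v k ↔ x ∈ orb w k) :
    canonicalizeWallet v k = canonicalizeWallet w k := by
  rw [canonicalizeWallet_eq_minFold, canonicalizeWallet_eq_minFold]
  obtain ⟨mv, hmv, hmemv, hminv⟩ := minFold_spec (orb v k) (orb_ne_nil v k)
  obtain ⟨mw, hmw, hmemw, hminw⟩ := minFold_spec (orb w k) (orb_ne_nil w k)
  rw [hmv, hmw]
  congr 1
  exact tupLt_connex mv mw (hminw mv ((h mv).mp hmemv)) (hminv mw ((h mw).mpr hmemw))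

theorem canon_eq_iff_key_mem_orb (v w : List Int) (k : Int) :
    canonicalizeWallet v k = canonicalizeWallet w k ↔ keyOf v k ∈ orb w k := by
  have hkey : keyOf v k ∈ orb v k := List.mem_map.mpr ⟨rng k, rng_mem_P k, rfl⟩
  constructor
  · intro h
    obtain ⟨mv, hmv, hmemv, _⟩ := minFold_spec (orb v k) (orb_ne_nil v k)
    obtain ⟨mw, hmw, hmemw, _⟩ := minFold_spec (orb w k) (orb_ne_nil w k)
    rw [canonicalizeWallet_eq_minFold, canonicalizeWallet_eq_minFold, hmv, hmw] at h
    obtain rfl : mv = mw := Option.some_injective _ h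
    have h1 := mem_orb_trans k v mv hmemv
    have h2 := mem_orb_trans k w mv hmemw
    exact ((h2 (keyOf v k)).mp ((h1 (keyOf v k)).mpr hkey))
  · intro h
    apply canon_eq_of_orb_iff
    intro x
    rw [← mem_orb_trans k v (keyOf v k) hkey x, ← mem_orb_trans k w (keyOf v k) h x]

theorem loops_eq (k : Int) (ws : List (List Int)) (sA : PySem.Set (Option (List Int)))
    (sB : PySem.Set (List Int)) (u : List (List Int))
    (hinv : ∀ v, (canonicalizeWallet v k ∈ sA) ↔ (keyOf v k ∈ sB)) :
    (ws.foldl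
      (fun (st : PySem.Set (Option (List Int)) × List (List Int)) wallet =>
        let canon := canonicalizeWallet wallet k
        if PySem.Set.contains st.1 canon then st
        else (PySem.Set.add st.1 canon, st.2 ++ [wallet]))
      (sA, u)).2 =
    (ws.foldl
      (fun (st : PySem.Set (List Int) × List (List Int)) wallet =>
        let key := srt (wallet.map (fun c => permuteBits c (rng k)))
        if PySem.Set.contains st.1 key then st
        else ((PySem.List.permutations (rng k) (rng k).length).foldl
                (fun s perm => PySem.Set.add s (srt (wallet.map (fun c => permuteBits c perm)))) st.1,
              st.2 ++ [wallet]))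
      (sB, u)).2 := by
  induction ws generalizing sA sB u with
  | nil => rfl
  | cons w ws ih =>
    simp only [List.foldl_cons]
    have hkey : srt (w.map (fun c => permuteBits c (rng k))) = keyOf w k := rfl
    have hcond : PySem.Set.contains sA (canonicalizeWallet w k)
        = PySem.Set.contains sB (keyOf w k) := by
      cases hA : PySem.Set.contains sA (canonicalizeWallet w k)
      · cases hB : PySem.Set.contains sB (keyOf w k)
        · rfl
        · exact absurd ((PySem.Set.contains_iff _ _).mpr
            ((hinv w).mpr ((PySem.Set.contains_iff _ _).mp hB))) (by rw [hA]; simp)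
      · exact ((PySem.Set.contains_iff _ _).mpr
          ((hinv w).mp ((PySem.Set.contains_iff _ _).mp hA))).symm
    by_cases hA : PySem.Set.contains sA (canonicalizeWallet w k) = true
    · simp only [hkey, hA, ← hcond, if_true]
      exact ih sA sB u hinv
    · rw [Bool.not_eq_true] at hA
      simp only [hkey, hA, ← hcond]
      apply ih
      intro v
      rw [PySem.Set.mem_add, PySem.Set.mem_foldl_add, hinv v]
      have : (canonicalizeWallet v k = canonicalizeWallet w k)
          ↔ (∃ p ∈ PySem.List.permutations (rng k) (rng k).length,
               keyOf v k = srt (w.map (fun c => permuteBits c p))) := by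
        rw [canon_eq_iff_key_mem_orb v w k]
        unfold orb P tf
        rw [List.mem_map]
        constructor
        · rintro ⟨p, hp, he⟩; exact ⟨p, hp, he.symm⟩
        · rintro ⟨p, hp, he⟩; exact ⟨p, hp, he.symm⟩
      rw [this]

-- ===== VERDICT (by name: the statement is the Claim_ definition above) =====
theorem deduplicateWalletsByArchitecture_spec : Claim_equal_deduplicateWalletsByArchitecture := by
  intro wallets keyCount _
  unfold Spec_deduplicateWalletsByArchitecture
  unfold deduplicateWalletsByArchitecture deduplicateWalletsByArchitecture_alt
  exact loops_eq keyCount wallets PySem.Set.empty PySem.Set.empty [] (by simp [PySem.Set.empty])
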